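-- pv_equiv track=rewrite | github.com/nagesh130/Python_Scripts | solar_panel_maintenance.py | get_maximum_string_output
-- ===== SOURCE A (Python) =====
-- from typing import List
--
-- def get_maximum_string_output(x: List[int]) -> str:
--     """
--     Find out what is the largest output we could possibly get from a given string of solar panels.
--
--     :param x: List of integers, each integer represents the output of one panel.
--     :return: The largest possible product of solar panel
--      output by removing certain panels.
--     """
--     # pass
--
--     if len(x) == 0:
--         return str(0)
--
--     if len(x) == 1:
--         return str(x[0])
--
--     """
--     Splitting the input into positive-negative lists
--     """
--     positive_numbers = []   #empty array
--     negative_numbers = []   #empty array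
--     for n in x:
--         if n > 0: positive_numbers.append(n)
--         elif n< 0: negative_numbers.append(n)
--
--     """
--     List counts
--     """
--     positive_counts = len(positive_numbers)
--     negative_counts = len(negative_numbers)
--
--     """
--     Handling all zeros edge case
--     """
--     if negative_counts == 0 and positive_counts == 0:
--         return str(0)
--
--     """
--     Handling all single negative panel edge cases
--     """
--     if negative_counts == 1 and positive_counts == 0:
--         return str(0)
--
--     """
--     Calculate positive power output by defining the variable
--     """
--     power_output = 1000
--     for n in positive_numbers:
--         power_output *= n
--
--     """
--     removing the largest negative panel arranged in odd steps
--     """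
--     if negative_counts % 2 == 1:
--         negative_numbers.remove(max(negative_numbers))
--
--     """
--     Calculate the negative power output by the loop
--     """
--     for n in negative_numbers:
--         power_output *= n
--
--     return str(power_output)
-- ===== SOURCE B (Python) =====
-- from typing import List
--
-- def get_maximum_string_output(x: List[int]) -> str:
--     # Single pass: accumulate the product of all nonzero panels (seeded with
--     # 1000), count negatives, and remember the closest-to-zero negative; if the
--     # negative count is odd, divide it back out (exact division).
--     if len(x) == 0:
--         return str(0)
--     if len(x) == 1:
--         return str(x[0])
--     product = 1000
--     negatives = 0
--     nonzeros = 0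
--     max_negative = None
--     for n in x:
--         if n != 0:
--             product *= n
--             nonzeros += 1
--             if n < 0:
--                 negatives += 1
--                 if max_negative is None or n > max_negative:
--                     max_negative = n
--     if nonzeros == 0:
--         return str(0)
--     if negatives == 1 and nonzeros == 1:
--         return str(0)
--     if negatives % 2 == 1:
--         product //= max_negative
--     return str(product)
-- ===== Notes on version B (the rewrite author's own statement) =====
-- stated objective: alternative
-- what changed: Replaces A's two-list split plus max()/remove() and two product loops by a single pass that accumulates the product of nonzero elements while counting negatives and tracking the maximum negative, then divides that negative back out (exact //) when the negative count is odd.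
import Mathlib
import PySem

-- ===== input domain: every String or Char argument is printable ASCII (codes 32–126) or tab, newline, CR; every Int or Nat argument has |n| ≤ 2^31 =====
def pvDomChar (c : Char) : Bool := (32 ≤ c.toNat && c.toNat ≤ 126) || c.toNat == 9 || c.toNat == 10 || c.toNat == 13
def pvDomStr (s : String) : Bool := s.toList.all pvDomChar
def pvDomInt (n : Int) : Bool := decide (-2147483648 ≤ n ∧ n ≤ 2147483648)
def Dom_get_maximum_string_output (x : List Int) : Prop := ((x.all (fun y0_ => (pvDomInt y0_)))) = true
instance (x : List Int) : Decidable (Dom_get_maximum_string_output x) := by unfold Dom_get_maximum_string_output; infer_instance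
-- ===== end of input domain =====

-- B replaces A's two-list split + max()/remove() by one fused pass (product of
-- nonzeros, negative count, running maximum negative) and one exact division;
-- objective: alternative (same O(n) cost, different decomposition).

-- ===== PORT A =====
def get_maximum_string_output (x : List Int) : String :=
  if x.length = 0 then PySem.Int.toStr 0
  else if x.length = 1 then PySem.Int.toStr ((PySem.List.pyGet? x 0).getD 0)
  else
    -- split into positive / negative lists
    let pn := x.foldl (fun (pq : List Int × List Int) n =>
      if n > 0 then (pq.1 ++ [n], pq.2)
      else if n < 0 then (pq.1, pq.2 ++ [n])
      else pq) ([], [])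
    let positive_numbers := pn.1
    let negative_numbers := pn.2
    let positive_counts := positive_numbers.length
    let negative_counts := negative_numbers.length
    if negative_counts = 0 ∧ positive_counts = 0 then PySem.Int.toStr 0
    else if negative_counts = 1 ∧ positive_counts = 0 then PySem.Int.toStr 0
    else
      let power_output := positive_numbers.foldl (· * ·) 1000
      -- negative_numbers.remove(max(negative_numbers)) when odd count
      let negative_numbers' :=
        if negative_counts % 2 = 1 then
          (PySem.List.remove? negative_numbers
            ((PySem.List.max? negative_numbers (fun y => y)).getD 0)).getD negative_numbers
        else negative_numbers
      let power_output' := negative_numbers'.foldl (· * ·) power_output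
      PySem.Int.toStr power_output'

-- ===== PORT B =====
-- one pass; state = (product, negatives, nonzeros, max_negative)
def get_maximum_string_output_alt (x : List Int) : String :=
  match x with
  | [] => PySem.Int.toStr 0
  | [a] => PySem.Int.toStr a
  | a :: b :: t =>
    let st := x.foldl (fun (s : Int × Int × Int × Option Int) n =>
      if n ≠ 0 then
        let product := s.1 * n
        let nonzeros := s.2.2.1 + 1
        if n < 0 then
          let mx := match s.2.2.2 with
            | none => some n
            | some m => if n > m then some n else some m
          (product, s.2.1 + 1, nonzeros, mx)
        else (product, s.2.1, nonzeros, s.2.2.2)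
      else s) (1000, 0, 0, none)
    if st.2.2.1 = 0 then PySem.Int.toStr 0
    else if st.2.1 = 1 ∧ st.2.2.1 = 1 then PySem.Int.toStr 0
    else
      let product := if st.2.1 % 2 = 1 then PySem.Int.floordiv st.1 (st.2.2.2.getD 0) else st.1
      PySem.Int.toStr product

-- ===== PRECONDITION & SPEC =====
def Spec_get_maximum_string_output (x : List Int) (out : String) : Prop := out = get_maximum_string_output_alt x
instance (x : List Int) (out : String) : Decidable (Spec_get_maximum_string_output x out) := by unfold Spec_get_maximum_string_output; infer_instance

-- ===== CLAIM (what is proved, stated in full; the proofs are below) =====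
def Claim_equal_get_maximum_string_output : Prop := ∀ (x : List Int), Dom_get_maximum_string_output x → Spec_get_maximum_string_output x (get_maximum_string_output x)

-- ===== LEMMAS AND PROOFS =====

def pvPos (x : List Int) : List Int := x.filter (fun n => decide (0 < n))
def pvNeg (x : List Int) : List Int := x.filter (fun n => decide (n < 0))
def pvNz (x : List Int) : List Int := x.filter (fun n => decide (n ≠ 0))

lemma pvPos_cons_pos {h : Int} (hc : 0 < h) (t : List Int) : pvPos (h :: t) = h :: pvPos t := by
  simp [pvPos, hc]
lemma pvPos_cons_not {h : Int} (hc : ¬ 0 < h) (t : List Int) : pvPos (h :: t) = pvPos t := by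
  simp [pvPos, hc]
lemma pvNeg_cons_neg {h : Int} (hc : h < 0) (t : List Int) : pvNeg (h :: t) = h :: pvNeg t := by
  simp [pvNeg, hc]
lemma pvNeg_cons_not {h : Int} (hc : ¬ h < 0) (t : List Int) : pvNeg (h :: t) = pvNeg t := by
  simp [pvNeg, hc]
lemma pvNz_cons_ne {h : Int} (hc : h ≠ 0) (t : List Int) : pvNz (h :: t) = h :: pvNz t := by
  simp [pvNz, hc]
lemma pvNz_cons_zero (t : List Int) : pvNz ((0 : Int) :: t) = pvNz t := by
  simp [pvNz]

lemma pvA_fold (x : List Int) (a b : List Int) :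
    x.foldl (fun (pq : List Int × List Int) n =>
      if n > 0 then (pq.1 ++ [n], pq.2)
      else if n < 0 then (pq.1, pq.2 ++ [n])
      else pq) (a, b) = (a ++ pvPos x, b ++ pvNeg x) := by
  induction x generalizing a b with
  | nil => simp [pvPos, pvNeg]
  | cons h t ih =>
    simp only [List.foldl_cons]
    rcases lt_trichotomy h 0 with hc | hc | hc
    · have e1 : ¬ h > 0 := by omega
      rw [if_neg e1, if_pos hc, ih, pvPos_cons_not e1, pvNeg_cons_neg hc]
      simp
    · subst hc
      have e1 : ¬ (0:Int) > 0 := by omega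
      have e2 : ¬ (0:Int) < 0 := by omega
      rw [if_neg e1, if_neg e2, ih, pvPos_cons_not e1, pvNeg_cons_not e2]
    · have e2 : ¬ h < 0 := by omega
      rw [if_pos hc, ih, pvPos_cons_pos hc, pvNeg_cons_not e2]
      simp

def pvMaxStep (o : Option Int) (n : Int) : Option Int :=
  match o with
  | none => some n
  | some m => if n > m then some n else some m

lemma pvB_fold (x : List Int) (p c z : Int) (m : Option Int) :
    x.foldl (fun (s : Int × Int × Int × Option Int) n =>
      if n ≠ 0 then
        let product := s.1 * n
        let nonzeros := s.2.2.1 + 1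
        if n < 0 then
          let mx := match s.2.2.2 with
            | none => some n
            | some m => if n > m then some n else some m
          (product, s.2.1 + 1, nonzeros, mx)
        else (product, s.2.1, nonzeros, s.2.2.2)
      else s) (p, c, z, m)
    = (p * (pvNz x).prod, c + ((pvNeg x).length : Int), z + ((pvNz x).length : Int),
       (pvNeg x).foldl pvMaxStep m) := by
  induction x generalizing p c z m with
  | nil => simp [pvNeg, pvNz]
  | cons h t ih =>
    simp only [List.foldl_cons]
    rcases lt_trichotomy h 0 with hc | hc | hc
    · have e1 : h ≠ 0 := by omega
      rw [if_pos e1, if_pos hc, ih, pvNz_cons_ne e1, pvNeg_cons_neg hc,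
        List.prod_cons, List.length_cons, List.length_cons, List.foldl_cons]
      refine Prod.ext (by ring) (Prod.ext ?_ (Prod.ext ?_ rfl)) <;> push_cast <;> ring
    · subst hc
      have e1 : ¬ ((0:Int) ≠ 0) := by omega
      have e2 : ¬ ((0:Int) < 0) := by omega
      rw [if_neg e1, ih, pvNz_cons_zero, pvNeg_cons_not e2]
    · have e1 : h ≠ 0 := by omega
      have e2 : ¬ h < 0 := by omega
      rw [if_pos e1, if_neg e2, ih, pvNz_cons_ne e1, pvNeg_cons_not e2,
        List.prod_cons, List.length_cons]
      refine Prod.ext (by ring) (Prod.ext rfl (Prod.ext ?_ rfl))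
      push_cast; ring

lemma pvMaxStep_some (m n : Int) : pvMaxStep (some m) n = some (max m n) := by
  by_cases h : n > m
  · simp [pvMaxStep, h, max_eq_right (by omega : m ≤ n)]
  · simp [pvMaxStep, h, max_eq_left (by omega : n ≤ m)]

lemma pvMaxStep_foldl_some (t : List Int) (m : Int) :
    t.foldl pvMaxStep (some m) = some (t.foldl max m) := by
  induction t generalizing m with
  | nil => rfl
  | cons h t ih => rw [List.foldl_cons, pvMaxStep_some, ih, List.foldl_cons]

lemma pvMaxStep_foldl_none (h : Int) (tl : List Int) :
    (h :: tl).foldl pvMaxStep none = some (tl.foldl max h) := by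
  rw [List.foldl_cons]
  exact pvMaxStep_foldl_some tl h

lemma pv_prod_split (x : List Int) : (pvNz x).prod = (pvPos x).prod * (pvNeg x).prod := by
  induction x with
  | nil => simp [pvPos, pvNeg, pvNz]
  | cons h t ih =>
    rcases lt_trichotomy h 0 with hc | hc | hc
    · rw [pvNz_cons_ne (by omega) t, pvNeg_cons_neg hc, pvPos_cons_not (by omega),
        List.prod_cons, List.prod_cons, ih]
      ring
    · subst hc
      rw [pvNz_cons_zero, pvNeg_cons_not (by omega), pvPos_cons_not (by omega), ih]
    · rw [pvNz_cons_ne (by omega) t, pvNeg_cons_not (by omega), pvPos_cons_pos hc,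
        List.prod_cons, List.prod_cons, ih]
      ring

lemma pv_len_split (x : List Int) : (pvNz x).length = (pvPos x).length + (pvNeg x).length := by
  induction x with
  | nil => simp [pvPos, pvNeg, pvNz]
  | cons h t ih =>
    rcases lt_trichotomy h 0 with hc | hc | hc
    · rw [pvNz_cons_ne (by omega) t, pvNeg_cons_neg hc, pvPos_cons_not (by omega),
        List.length_cons, List.length_cons]
      omega
    · subst hc
      rw [pvNz_cons_zero, pvNeg_cons_not (by omega), pvPos_cons_not (by omega), ih]
    · rw [pvNz_cons_ne (by omega) t, pvNeg_cons_not (by omega), pvPos_cons_pos hc,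
        List.length_cons, List.length_cons]
      omega

lemma pv_foldl_mul (l : List Int) (a : Int) : l.foldl (· * ·) a = a * l.prod := by
  induction l generalizing a with
  | nil => simp
  | cons h t ih => rw [List.foldl_cons, ih, List.prod_cons]; ring

-- ===== VERDICT (by name: the statement is the Claim_ definition above) =====
theorem get_maximum_string_output_spec : Claim_equal_get_maximum_string_output := by
  intro x _
  unfold Spec_get_maximum_string_output
  match x with
  | [] => rfl
  | [a] =>
    simp [get_maximum_string_output, get_maximum_string_output_alt,
      PySem.List.pyGet?, PySem.List.pyIdx?]
  | a :: b :: t =>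
    rw [get_maximum_string_output, get_maximum_string_output_alt]
    have hx0 : ¬ ((a :: b :: t).length = 0) := by simp
    have hx1 : ¬ ((a :: b :: t).length = 1) := by simp
    rw [if_neg hx0, if_neg hx1]
    simp only [pvA_fold, pvB_fold, List.nil_append, zero_add]
    have hlen : (pvNz (a :: b :: t)).length
        = (pvPos (a :: b :: t)).length + (pvNeg (a :: b :: t)).length :=
      pv_len_split _
    have hprod : (pvNz (a :: b :: t)).prod
        = (pvPos (a :: b :: t)).prod * (pvNeg (a :: b :: t)).prod :=
      pv_prod_split _
    by_cases h0 : (pvNeg (a :: b :: t)).length = 0 ∧ (pvPos (a :: b :: t)).length = 0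
    · have g0 : ((pvNz (a :: b :: t)).length : Int) = 0 := by omega
      rw [if_pos h0, if_pos g0]
    · have g0 : ¬ ((pvNz (a :: b :: t)).length : Int) = 0 := by omega
      rw [if_neg h0, if_neg g0]
      by_cases h1 : (pvNeg (a :: b :: t)).length = 1 ∧ (pvPos (a :: b :: t)).length = 0
      · have g1 : ((pvNeg (a :: b :: t)).length : Int) = 1
            ∧ ((pvNz (a :: b :: t)).length : Int) = 1 := by omega
        rw [if_pos h1, if_pos g1]
      · have g1 : ¬ (((pvNeg (a :: b :: t)).length : Int) = 1
            ∧ ((pvNz (a :: b :: t)).length : Int) = 1) := by omega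
        rw [if_neg h1, if_neg g1]
        by_cases hodd : (pvNeg (a :: b :: t)).length % 2 = 1
        · have godd : ((pvNeg (a :: b :: t)).length : Int) % 2 = 1 := by omega
          rw [if_pos hodd, if_pos godd]
          cases hNe : pvNeg (a :: b :: t) with
          | nil => rw [hNe] at hodd; simp at hodd
          | cons h tl =>
            have hmax : PySem.List.max? (h :: tl) (fun y => y)
                = some (tl.foldl max h) := PySem.List.max?_id_cons h tl
            have hMem : tl.foldl max h ∈ (h :: tl) := PySem.List.max?_mem hmax
            have hMneg : tl.foldl max h < 0 := by
              have hm2 : tl.foldl max h ∈ pvNeg (a :: b :: t) := by rw [hNe]; exact hMem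
              have := List.of_mem_filter (p := fun n => decide (n < 0)) hm2
              simpa using this
            rw [hmax, Option.getD_some,
              PySem.List.remove?_eq_some_erase (h :: tl) (tl.foldl max h) hMem,
              Option.getD_some, pvMaxStep_foldl_none, Option.getD_some,
              pv_foldl_mul, pv_foldl_mul]
            have herase : (tl.foldl max h) * ((h :: tl).erase (tl.foldl max h)).prod
                = (h :: tl).prod := List.prod_erase hMem
            congr 1
            have hkey : 1000 * (pvNz (a :: b :: t)).prod
                = (1000 * (pvPos (a :: b :: t)).prod
                    * ((h :: tl).erase (tl.foldl max h)).prod) * (tl.foldl max h) := by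
              rw [hprod, hNe, ← herase]; ring
            rw [hkey, PySem.Int.floordiv, Int.mul_fdiv_cancel _ (by omega)]
        · have godd : ¬ ((pvNeg (a :: b :: t)).length : Int) % 2 = 1 := by omega
          rw [if_neg hodd, if_neg godd, pv_foldl_mul, pv_foldl_mul, hprod]
          congr 1
          ring
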